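-- pv_equiv track=rewrite | github.com/SzymonIwaniuk/wdi-2024-2025 | Zestaw2/zad1A2023.py | parami_zgodne
-- ===== SOURCE A (Python) =====
-- def parami_zgodne(n1, n2):
--     if n1 >= n2:
--         higher = n1
--         lower = n2
--     else:
--         higher = n2
--         lower = n1
--
--     i = 2
--
--     while i <= lower:
--         if lower % i == 0 and higher % i == 0:
--             while higher % i == 0:
--                 higher //= i
--
--             while lower % i == 0:
--                 lower //= i
--
--         i += 1
--
--     if higher == 1 and lower == 1:
--         return True
--     else:
--         return False
-- ===== SOURCE B (Python) =====
-- from math import gcd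
--
--
-- def parami_zgodne(n1, n2):
--     # True iff n1 and n2 have the same set of distinct prime factors.
--     if n1 < 1 or n2 < 1:
--         return False
--     g = gcd(n1, n2)
--     return _strip(n1, g) == 1 and _strip(n2, g) == 1
--
--
-- def _strip(x, d):
--     # Divide out of x every prime factor it shares with d.
--     h = gcd(x, d)
--     while h > 1:
--         x //= h
--         h = gcd(x, d)
--     return x
-- ===== Notes on version B (the rewrite author's own statement) =====
-- stated objective: faster
-- what changed: Replaces A's trial division over every integer 2..min(n1,n2) with gcd-based stripping: compute g=gcd(n1,n2) once, then repeatedly divide each number by its gcd with g; both reduce to 1 iff they share the same distinct primes.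
import Mathlib
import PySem

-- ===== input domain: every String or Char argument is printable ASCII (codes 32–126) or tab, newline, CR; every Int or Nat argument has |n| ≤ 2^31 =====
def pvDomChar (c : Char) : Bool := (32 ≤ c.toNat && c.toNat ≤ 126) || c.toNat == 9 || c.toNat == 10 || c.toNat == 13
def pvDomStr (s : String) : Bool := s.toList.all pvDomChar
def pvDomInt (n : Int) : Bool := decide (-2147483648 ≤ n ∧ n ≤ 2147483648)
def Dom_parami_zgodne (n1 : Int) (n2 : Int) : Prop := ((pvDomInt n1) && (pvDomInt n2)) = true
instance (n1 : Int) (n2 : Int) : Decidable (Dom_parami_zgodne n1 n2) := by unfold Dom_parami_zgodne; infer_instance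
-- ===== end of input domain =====

-- B replaces A's trial division over every integer 2..min(n1,n2) by gcd-based prime stripping (asymptotically faster).

-- ===== PORT A =====
-- inner 'while x % i == 0: x //= i' loop; the fuel argument is a totality guard only
-- (x.toNat steps always suffice: on every call A's code makes, x ≥ 1 and i ≥ 2, so x
-- strictly decreases; without a guard the Python loop would not terminate either, e.g. x = 0).
def pvDivOutGo : Nat → Int → Int → Int
  | 0, x, _ => x
  | fuel + 1, x, i =>
    if PySem.Int.mod x i = 0 then pvDivOutGo fuel (PySem.Int.floordiv x i) i else x

def pvDivOut (x i : Int) : Int := pvDivOutGo x.toNat x i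

-- the outer 'while i <= lower' loop together with the final 'higher == 1 and lower == 1';
-- fuel is a totality guard only ((lower + 1 - i).toNat steps suffice: i increments and
-- lower never grows, and fuel 0 can only be reached once i > lower, the loop's exit test).
def pvLoopAGo : Nat → Int → Int → Int → Bool
  | 0, _, higher, lower => higher == 1 && lower == 1
  | fuel + 1, i, higher, lower =>
    if i ≤ lower then
      if PySem.Int.mod lower i = 0 ∧ PySem.Int.mod higher i = 0 then
        pvLoopAGo fuel (i + 1) (pvDivOut higher i) (pvDivOut lower i)
      else pvLoopAGo fuel (i + 1) higher lower
    else higher == 1 && lower == 1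

def pvLoopA (i higher lower : Int) : Bool := pvLoopAGo (lower + 1 - i).toNat i higher lower

def parami_zgodne (n1 : Int) (n2 : Int) : Bool :=
  if n1 ≥ n2 then pvLoopA 2 n1 n2 else pvLoopA 2 n2 n1

-- ===== PORT B =====
-- _strip from Source B: 'h = gcd(x, d); while h > 1: x //= h; h = gcd(x, d)'; fuel is a
-- totality guard only (x ≥ 1 on every call B makes, and x strictly decreases).
def pvStripGo : Nat → Int → Int → Int
  | 0, x, _ => x
  | fuel + 1, x, d =>
    if 1 < ((Int.gcd x d : Nat) : Int) then
      pvStripGo fuel (PySem.Int.floordiv x ((Int.gcd x d : Nat) : Int)) d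
    else x

def pvStrip (x d : Int) : Int := pvStripGo x.toNat x d

def parami_zgodne_alt (n1 : Int) (n2 : Int) : Bool :=
  if n1 < 1 || n2 < 1 then false
  else
    let g : Int := ((Int.gcd n1 n2 : Nat) : Int)
    pvStrip n1 g == 1 && pvStrip n2 g == 1

-- ===== PRECONDITION & SPEC =====
def Spec_parami_zgodne (n1 : Int) (n2 : Int) (out : Bool) : Prop := out = parami_zgodne_alt n1 n2
instance (n1 : Int) (n2 : Int) (out : Bool) : Decidable (Spec_parami_zgodne n1 n2 out) := by unfold Spec_parami_zgodne; infer_instance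

-- ===== CLAIM (what is proved, stated in full; the proofs are below) =====
def Claim_equal_parami_zgodne : Prop := ∀ (n1 : Int) (n2 : Int), Dom_parami_zgodne n1 n2 → Spec_parami_zgodne n1 n2 (parami_zgodne n1 n2)

-- ===== LEMMAS AND PROOFS =====

-- "a and b have the same distinct prime divisors"
def pvSP (a b : Int) : Prop := ∀ q : Int, Prime q → (q ∣ a ↔ q ∣ b)

theorem pvSP_symm {a b : Int} (h : pvSP a b) : pvSP b a :=
  fun q hq => (h q hq).symm

-- ---- shared arithmetic facts ----

theorem pvEdivLt (x i : Int) (hx : 1 ≤ x) (hi : 2 ≤ i) : x / i < x := by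
  have h0 : 0 ≤ x / i := Int.ediv_nonneg (by omega) (by omega)
  have h1 : x / i * i ≤ x := Int.ediv_mul_le x (by omega)
  nlinarith

theorem pvFloordivPos (x i : Int) (hi : 2 ≤ i) (hx : 1 ≤ x) (hdvd : i ∣ x) :
    1 ≤ PySem.Int.floordiv x i := by
  rw [PySem.Int.floordiv_eq_ediv_of_pos (by omega)]
  have h0 : 0 ≤ x / i := Int.ediv_nonneg (by omega) (by omega)
  have hne : x / i ≠ 0 := by
    intro h0'
    have := Int.ediv_mul_cancel hdvd
    rw [h0'] at this
    omega
  omega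

-- ---- facts about A's inner stripping loop ----

theorem pvDivOutGo_dvd (fuel : Nat) (x i : Int) (hi : 2 ≤ i) : pvDivOutGo fuel x i ∣ x := by
  induction fuel generalizing x with
  | zero => exact dvd_rfl
  | succ fuel ih =>
    rw [pvDivOutGo]
    split_ifs with hm
    · have hdvd : i ∣ x := (PySem.Int.mod_eq_zero_iff_dvd x i).mp hm
      have hxi : PySem.Int.floordiv x i ∣ x := by
        rw [PySem.Int.floordiv_eq_ediv_of_pos (by omega : (0:Int) < i)]
        exact ⟨i, (Int.ediv_mul_cancel hdvd).symm⟩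
      exact dvd_trans (ih _) hxi
    · exact dvd_rfl

theorem pvDivOutGo_pos (fuel : Nat) (x i : Int) (hi : 2 ≤ i) (hx : 1 ≤ x) :
    1 ≤ pvDivOutGo fuel x i := by
  induction fuel generalizing x with
  | zero => exact hx
  | succ fuel ih =>
    rw [pvDivOutGo]
    split_ifs with hm
    · exact ih _ (pvFloordivPos x i hi hx ((PySem.Int.mod_eq_zero_iff_dvd x i).mp hm))
    · exact hx

theorem pvDivOutGo_le (fuel : Nat) (x i : Int) (hi : 2 ≤ i) (hx : 1 ≤ x) :
    pvDivOutGo fuel x i ≤ x := by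
  induction fuel generalizing x with
  | zero => exact le_refl x
  | succ fuel ih =>
    rw [pvDivOutGo]
    split_ifs with hm
    · have hdvd : i ∣ x := (PySem.Int.mod_eq_zero_iff_dvd x i).mp hm
      have hp := pvFloordivPos x i hi hx hdvd
      have hle : PySem.Int.floordiv x i ≤ x := by
        rw [PySem.Int.floordiv_eq_ediv_of_pos (by omega : (0:Int) < i)]
        exact le_of_lt (pvEdivLt x i hx hi)
      exact le_trans (ih _ hp) hle
    · exact le_refl x

theorem pvDivOutGo_not_dvd (fuel : Nat) (x i : Int) (hf : x.toNat ≤ fuel)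
    (hi : 2 ≤ i) (hx : 1 ≤ x) : ¬ i ∣ pvDivOutGo fuel x i := by
  induction fuel generalizing x with
  | zero => omega
  | succ fuel ih =>
    rw [pvDivOutGo]
    split_ifs with hm
    · have hdvd : i ∣ x := (PySem.Int.mod_eq_zero_iff_dvd x i).mp hm
      have hp := pvFloordivPos x i hi hx hdvd
      have hlt : PySem.Int.floordiv x i < x := by
        rw [PySem.Int.floordiv_eq_ediv_of_pos (by omega : (0:Int) < i)]
        exact pvEdivLt x i hx hi
      exact ih _ (by omega) hp
    · intro hdvd
      exact hm ((PySem.Int.mod_eq_zero_iff_dvd x i).mpr hdvd)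

theorem pvDivOutGo_prime_dvd (fuel : Nat) (x i q : Int) (hi : 2 ≤ i)
    (hq : Prime q) (hqi : ¬ q ∣ i) : q ∣ pvDivOutGo fuel x i ↔ q ∣ x := by
  induction fuel generalizing x with
  | zero => exact Iff.rfl
  | succ fuel ih =>
    rw [pvDivOutGo]
    split_ifs with hm
    · have hdvd : i ∣ x := (PySem.Int.mod_eq_zero_iff_dvd x i).mp hm
      have hfe : PySem.Int.floordiv x i = x / i :=
        PySem.Int.floordiv_eq_ediv_of_pos (by omega : (0:Int) < i)
      have hmul : x / i * i = x := Int.ediv_mul_cancel hdvd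
      rw [ih _, hfe]
      constructor
      · intro hd
        exact dvd_trans hd ⟨i, hmul.symm⟩
      · intro hd
        rcases (hq.dvd_mul.mp (by rw [mul_comm] at hmul; rw [hmul]; exact hd)) with h1 | h1
        · exact absurd h1 hqi
        · exact h1
    · exact Iff.rfl

theorem pvDivOut_dvd (x i : Int) (hi : 2 ≤ i) : pvDivOut x i ∣ x :=
  pvDivOutGo_dvd _ x i hi

theorem pvDivOut_pos (x i : Int) (hi : 2 ≤ i) (hx : 1 ≤ x) : 1 ≤ pvDivOut x i :=
  pvDivOutGo_pos _ x i hi hx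

theorem pvDivOut_le (x i : Int) (hi : 2 ≤ i) (hx : 1 ≤ x) : pvDivOut x i ≤ x :=
  pvDivOutGo_le _ x i hi hx

theorem pvDivOut_not_dvd (x i : Int) (hi : 2 ≤ i) (hx : 1 ≤ x) : ¬ i ∣ pvDivOut x i :=
  pvDivOutGo_not_dvd _ x i (le_refl _) hi hx

theorem pvDivOut_prime_dvd (x i q : Int) (hi : 2 ≤ i) (hq : Prime q) (hqi : ¬ q ∣ i) :
    q ∣ pvDivOut x i ↔ q ∣ x :=
  pvDivOutGo_prime_dvd _ x i q hi hq hqi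

-- ---- facts about B's stripping loop ----

theorem pvStripGo_dvd (fuel : Nat) (x d : Int) : pvStripGo fuel x d ∣ x := by
  induction fuel generalizing x with
  | zero => exact dvd_rfl
  | succ fuel ih =>
    rw [pvStripGo]
    split_ifs with hg
    · have hdvd : ((Int.gcd x d : Nat) : Int) ∣ x := Int.gcd_dvd_left x d
      have hxi : PySem.Int.floordiv x ((Int.gcd x d : Nat) : Int) ∣ x := by
        rw [PySem.Int.floordiv_eq_ediv_of_pos (by omega)]
        exact ⟨((Int.gcd x d : Nat) : Int), (Int.ediv_mul_cancel hdvd).symm⟩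
      exact dvd_trans (ih _) hxi
    · exact dvd_rfl

theorem pvStripGo_pos (fuel : Nat) (x d : Int) (hx : 1 ≤ x) : 1 ≤ pvStripGo fuel x d := by
  induction fuel generalizing x with
  | zero => exact hx
  | succ fuel ih =>
    rw [pvStripGo]
    split_ifs with hg
    · exact ih _ (pvFloordivPos x _ (by omega) hx (Int.gcd_dvd_left x d))
    · exact hx

theorem pvStripGo_stop (fuel : Nat) (x d : Int) (hf : x.toNat ≤ fuel) (hx : 1 ≤ x) :
    ((Int.gcd (pvStripGo fuel x d) d : Nat) : Int) ≤ 1 := by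
  induction fuel generalizing x with
  | zero => omega
  | succ fuel ih =>
    rw [pvStripGo]
    split_ifs with hg
    · have hdvd : ((Int.gcd x d : Nat) : Int) ∣ x := Int.gcd_dvd_left x d
      have hp := pvFloordivPos x _ (by omega) hx hdvd
      have hlt : PySem.Int.floordiv x ((Int.gcd x d : Nat) : Int) < x := by
        rw [PySem.Int.floordiv_eq_ediv_of_pos (by omega)]
        exact pvEdivLt x _ hx (by omega)
      exact ih _ (by omega) hp
    · omega

theorem pvStripGo_prime_dvd (fuel : Nat) (x d q : Int) (hq : Prime q) (hqd : ¬ q ∣ d) :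
    q ∣ pvStripGo fuel x d ↔ q ∣ x := by
  induction fuel generalizing x with
  | zero => exact Iff.rfl
  | succ fuel ih =>
    rw [pvStripGo]
    split_ifs with hg
    · have hdvd : ((Int.gcd x d : Nat) : Int) ∣ x := Int.gcd_dvd_left x d
      have hfe : PySem.Int.floordiv x ((Int.gcd x d : Nat) : Int) = x / ((Int.gcd x d : Nat) : Int) :=
        PySem.Int.floordiv_eq_ediv_of_pos (by omega)
      have hmul : x / ((Int.gcd x d : Nat) : Int) * ((Int.gcd x d : Nat) : Int) = x :=
        Int.ediv_mul_cancel hdvd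
      have hqg : ¬ q ∣ ((Int.gcd x d : Nat) : Int) := by
        intro hc
        exact hqd (dvd_trans hc (Int.gcd_dvd_right x d))
      rw [ih _, hfe]
      constructor
      · intro hd
        exact dvd_trans hd ⟨((Int.gcd x d : Nat) : Int), hmul.symm⟩
      · intro hd
        rcases (hq.dvd_mul.mp (by rw [mul_comm] at hmul; rw [hmul]; exact hd)) with h1 | h1
        · exact absurd h1 hqg
        · exact h1
    · exact Iff.rfl

theorem pvStrip_eq_one_iff (x d : Int) (hx : 1 ≤ x) :
    pvStrip x d = 1 ↔ ∀ q : Int, Prime q → q ∣ x → q ∣ d := by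
  unfold pvStrip
  constructor
  · intro h1 q hq hqx
    by_contra hqd
    have := (pvStripGo_prime_dvd x.toNat x d q hq hqd).mpr hqx
    rw [h1] at this
    exact hq.not_dvd_one this
  · intro hall
    by_contra hne
    have hpos : 1 ≤ pvStripGo x.toNat x d := pvStripGo_pos x.toNat x d hx
    have hna : (pvStripGo x.toNat x d).natAbs ≠ 1 := by omega
    obtain ⟨q, hq, hqs⟩ := Int.exists_prime_and_dvd hna
    have hqx : q ∣ x := dvd_trans hqs (pvStripGo_dvd x.toNat x d)
    have hqd : q ∣ d := hall q hq hqx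
    have hdg : q.natAbs ∣ Int.gcd (pvStripGo x.toNat x d) d :=
      Nat.dvd_gcd (Int.natAbs_dvd_natAbs.mpr hqs) (Int.natAbs_dvd_natAbs.mpr hqd)
    have hq2 : 2 ≤ q.natAbs := (Int.prime_iff_natAbs_prime.mp hq).two_le
    have hgpos : 0 < Int.gcd (pvStripGo x.toNat x d) d := by
      rcases Nat.eq_zero_or_pos (Int.gcd (pvStripGo x.toNat x d) d) with h0 | h0
      · have := Int.gcd_eq_zero_iff.mp h0
        omega
      · exact h0
    have hle := Nat.le_of_dvd hgpos hdg
    have := pvStripGo_stop x.toNat x d (le_refl _) hx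
    omega

-- ---- A's outer loop returns true iff higher and lower share the same primes ----

theorem pvSP_divOut (h l i : Int) (hi : 2 ≤ i) (hh : 1 ≤ h) (hl : 1 ≤ l)
    (hp : Prime i) (hih : i ∣ h) (hil : i ∣ l) :
    pvSP (pvDivOut h i) (pvDivOut l i) ↔ pvSP h l := by
  have keyh := pvDivOut_not_dvd h i hi hh
  have keyl := pvDivOut_not_dvd l i hi hl
  have hqiff : ∀ q : Int, Prime q → q ∣ i → ∀ y : Int, (q ∣ y ↔ i ∣ y) := by
    intro q hq hqi y
    have h1 : q.natAbs ∣ i.natAbs := Int.natAbs_dvd_natAbs.mpr hqi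
    have h2 : q.natAbs = i.natAbs := by
      have hip := Int.prime_iff_natAbs_prime.mp hp
      have hqp := Int.prime_iff_natAbs_prime.mp hq
      exact ((Nat.Prime.eq_one_or_self_of_dvd hip _ h1).resolve_left hqp.one_lt.ne').symm ▸ rfl
    constructor
    · intro hy
      rw [← Int.natAbs_dvd, ← h2, Int.natAbs_dvd]
      exact hy
    · intro hy
      rw [← Int.natAbs_dvd, h2, Int.natAbs_dvd]
      exact hy
  constructor
  · intro hsp q hq
    by_cases hqi : q ∣ i
    · constructor
      · intro _; exact (hqiff q hq hqi l).mpr hil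
      · intro _; exact (hqiff q hq hqi h).mpr hih
    · rw [← pvDivOut_prime_dvd h i q hi hq hqi, ← pvDivOut_prime_dvd l i q hi hq hqi]
      exact hsp q hq
  · intro hsp q hq
    by_cases hqi : q ∣ i
    · constructor
      · intro hc; exact absurd ((hqiff q hq hqi _).mp hc) keyh
      · intro hc; exact absurd ((hqiff q hq hqi _).mp hc) keyl
    · rw [pvDivOut_prime_dvd h i q hi hq hqi, pvDivOut_prime_dvd l i q hi hq hqi]
      exact hsp q hq

-- at loop exit (i > lower): both reduced to 1 iff same prime support, given the invariant
theorem pvExit (i h l : Int) (_hi2 : 2 ≤ i) (hh : 1 ≤ h) (hl : 1 ≤ l) (hlt : l < i)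
    (hinv : ∀ e : Int, 2 ≤ e → e < i → ¬(e ∣ h ∧ e ∣ l)) :
    ((h == 1 && l == 1) = true) ↔ pvSP h l := by
  simp only [Bool.and_eq_true, beq_iff_eq]
  constructor
  · rintro ⟨rfl, rfl⟩
    exact fun q hq => Iff.rfl
  · intro hsp
    have hl1 : l = 1 := by
      by_contra hlne
      have hna : l.natAbs ≠ 1 := by omega
      obtain ⟨q, hq, hql⟩ := Int.exists_prime_and_dvd hna
      have hqn : Prime ((q.natAbs : Nat) : Int) :=
        Nat.prime_iff_prime_int.mp (Int.prime_iff_natAbs_prime.mp hq)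
      have he2 : 2 ≤ (q.natAbs : Int) :=
        by exact_mod_cast (Int.prime_iff_natAbs_prime.mp hq).two_le
      have hel : (q.natAbs : Int) ∣ l := Int.natAbs_dvd.mpr hql
      have hele : (q.natAbs : Int) ≤ l := Int.le_of_dvd (by omega) hel
      have heh : (q.natAbs : Int) ∣ h := (hsp _ hqn).mpr hel
      exact hinv (q.natAbs : Int) he2 (by omega) ⟨heh, hel⟩
    subst hl1
    refine ⟨?_, rfl⟩
    by_contra hhne
    have hna : h.natAbs ≠ 1 := by omega
    obtain ⟨q, hq, hqh⟩ := Int.exists_prime_and_dvd hna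
    exact hq.not_dvd_one ((hsp q hq).mp hqh)

theorem pvLoopAGo_char (fuel : Nat) :
    ∀ i h l : Int, (l + 1 - i).toNat ≤ fuel → 2 ≤ i → 1 ≤ h → 1 ≤ l →
    (∀ e : Int, 2 ≤ e → e < i → ¬(e ∣ h ∧ e ∣ l)) →
    (pvLoopAGo fuel i h l = true ↔ pvSP h l) := by
  induction fuel with
  | zero =>
    intro i h l hf hi2 hh hl hinv
    rw [pvLoopAGo]
    exact pvExit i h l hi2 hh hl (by omega) hinv
  | succ fuel ih =>
    intro i h l hf hi2 hh hl hinv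
    rw [pvLoopAGo]
    split_ifs with hle hc
    · -- i ≤ l and i divides both: strip i out of both
      have hil : i ∣ l := (PySem.Int.mod_eq_zero_iff_dvd l i).mp hc.1
      have hih : i ∣ h := (PySem.Int.mod_eq_zero_iff_dvd h i).mp hc.2
      have hp : Prime i := by
        by_contra hnp
        have hi2n : 2 ≤ i.toNat := by omega
        have hnpn : ¬ i.toNat.Prime := by
          intro hpn
          have : Prime ((i.toNat : Nat) : Int) := Nat.prime_iff_prime_int.mp hpn
          rw [Int.toNat_of_nonneg (by omega)] at this
          exact hnp this
        obtain ⟨m, hmdvd, hm2, hmlt⟩ := Nat.exists_dvd_of_not_prime2 hi2n hnpn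
        have hmi : (m : Int) ∣ i := by
          have : (m : Int) ∣ ((i.toNat : Nat) : Int) := Int.natCast_dvd_natCast.mpr hmdvd
          rwa [Int.toNat_of_nonneg (by omega)] at this
        exact hinv m (by omega) (by omega)
          ⟨dvd_trans hmi hih, dvd_trans hmi hil⟩
      have hh' : 1 ≤ pvDivOut h i := pvDivOut_pos h i hi2 hh
      have hl' : 1 ≤ pvDivOut l i := pvDivOut_pos l i hi2 hl
      have hldec : pvDivOut l i ≤ l := pvDivOut_le l i hi2 hl
      have hinv' : ∀ e : Int, 2 ≤ e → e < i + 1 → ¬(e ∣ pvDivOut h i ∧ e ∣ pvDivOut l i) := by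
        intro e he2 helt ⟨heh, hel⟩
        by_cases hei : e = i
        · subst hei
          exact pvDivOut_not_dvd l e he2 hl hel
        · exact hinv e he2 (by omega)
            ⟨dvd_trans heh (pvDivOut_dvd h i hi2), dvd_trans hel (pvDivOut_dvd l i hi2)⟩
      rw [ih _ _ _ (by omega) (by omega) hh' hl' hinv']
      exact pvSP_divOut h l i hi2 hh hl hp hih hil
    · -- i ≤ l but i does not divide both: just advance i
      have hinv' : ∀ e : Int, 2 ≤ e → e < i + 1 → ¬(e ∣ h ∧ e ∣ l) := by
        intro e he2 helt ⟨heh, hel⟩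
        by_cases hei : e = i
        · subst hei
          exact hc ⟨(PySem.Int.mod_eq_zero_iff_dvd l e).mpr hel,
                    (PySem.Int.mod_eq_zero_iff_dvd h e).mpr heh⟩
        · exact hinv e he2 (by omega) ⟨heh, hel⟩
      exact ih _ _ _ (by omega) (by omega) hh hl hinv'
    · -- i > l: exit
      exact pvExit i h l hi2 hh hl (by omega) hinv

-- ---- B returns true iff the inputs share the same primes ----

theorem pvAlt_char (n1 n2 : Int) (h1 : 1 ≤ n1) (h2 : 1 ≤ n2) :
    parami_zgodne_alt n1 n2 = true ↔ pvSP n1 n2 := by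
  unfold parami_zgodne_alt
  rw [if_neg (by simp; omega)]
  simp only [Bool.and_eq_true, beq_iff_eq]
  have hgcd : ∀ q : Int, Prime q →
      (q ∣ ((Int.gcd n1 n2 : Nat) : Int) ↔ q ∣ n1 ∧ q ∣ n2) := by
    intro q _
    constructor
    · intro hd
      exact ⟨dvd_trans hd (Int.gcd_dvd_left n1 n2), dvd_trans hd (Int.gcd_dvd_right n1 n2)⟩
    · intro ⟨ha, hb⟩
      have hn : q.natAbs ∣ Int.gcd n1 n2 :=
        Nat.dvd_gcd (Int.natAbs_dvd_natAbs.mpr ha) (Int.natAbs_dvd_natAbs.mpr hb)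
      exact Int.natAbs_dvd.mp (Int.natCast_dvd_natCast.mpr hn)
  rw [pvStrip_eq_one_iff n1 _ h1, pvStrip_eq_one_iff n2 _ h2]
  constructor
  · intro ⟨ha, hb⟩ q hq
    constructor
    · intro hd
      exact ((hgcd q hq).mp (ha q hq hd)).2
    · intro hd
      exact ((hgcd q hq).mp (hb q hq hd)).1
  · intro hsp
    constructor
    · intro q hq hd
      exact (hgcd q hq).mpr ⟨hd, (hsp q hq).mp hd⟩
    · intro q hq hd
      exact (hgcd q hq).mpr ⟨(hsp q hq).mpr hd, hd⟩

-- ===== VERDICT (by name: the statement is the Claim_ definition above) =====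
theorem parami_zgodne_spec : Claim_equal_parami_zgodne := by
  intro n1 n2 _
  unfold Spec_parami_zgodne
  by_cases hpos : 1 ≤ n1 ∧ 1 ≤ n2
  · have hA : parami_zgodne n1 n2 = true ↔ pvSP n1 n2 := by
      unfold parami_zgodne pvLoopA
      split_ifs with hge
      · exact pvLoopAGo_char _ 2 n1 n2 (le_refl _) (by omega) hpos.1 hpos.2
          (fun e he1 he2 => by omega)
      · rw [pvLoopAGo_char _ 2 n2 n1 (le_refl _) (by omega) hpos.2 hpos.1
          (fun e he1 he2 => by omega)]
        exact ⟨pvSP_symm, pvSP_symm⟩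
    have hB := pvAlt_char n1 n2 hpos.1 hpos.2
    have hiff : (parami_zgodne n1 n2 = true) ↔ (parami_zgodne_alt n1 n2 = true) :=
      hA.trans hB.symm
    cases hA' : parami_zgodne n1 n2 <;> cases hB' : parami_zgodne_alt n1 n2 <;>
      simp [hA', hB'] at hiff ⊢
  · have hAf : parami_zgodne n1 n2 = false := by
      unfold parami_zgodne pvLoopA
      split_ifs with hge
      · rw [show ((n2 + 1 - 2).toNat) = 0 from by omega, pvLoopAGo]
        simp only [Bool.and_eq_false_iff, beq_eq_false_iff_ne]
        right; omega
      · rw [show ((n1 + 1 - 2).toNat) = 0 from by omega, pvLoopAGo]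
        simp only [Bool.and_eq_false_iff, beq_eq_false_iff_ne]
        right; omega
    have hBf : parami_zgodne_alt n1 n2 = false := by
      unfold parami_zgodne_alt
      rw [if_pos (by simp; omega)]
    rw [hAf, hBf]
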